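-- pv_equiv track=rewrite | github.com/dimistsaousis/coursera | Algorithms & Data Structures Specialisation/Algorithms on Strings/w34_efficient_string_algorithms/2_suffix_array_long.py | update_classes
-- ===== SOURCE A (Python) =====
-- def update_classes(text_order, text_class, layer):
--     n = len(text_order)
--     new_class = [0]*n
--     new_class[text_order[0]] = 0
--
--     for i in range(1, n):
--         cur = text_order[i]
--         prev = text_order[i-1]
--         mid = (cur+layer) % n
--         mid_prev = (prev+layer) % n
--         if text_class[cur] != text_class[prev] or text_class[mid] != text_class[mid_prev]:
--             new_class[cur] = new_class[prev] + 1
--         else: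
--             new_class[cur] = new_class[prev]
--     return new_class
-- ===== SOURCE B (Python) =====
-- def update_classes(text_order, text_class, layer):
--     n = len(text_order)
--     # pass 1: 0/1 indicators of "rank increases between consecutive order positions"
--     flags = [
--         1 if text_class[text_order[i]] != text_class[text_order[i - 1]]
--              or text_class[(text_order[i] + layer) % n] != text_class[(text_order[i - 1] + layer) % n]
--         else 0
--         for i in range(1, n)
--     ]
--     # pass 2: prefix sums of the indicators give the rank at each order position
--     ranks = [0]
--     s = 0
--     for f in flags:
--         s += f
--         ranks.append(s)
--     # pass 3: scatter ranks back to text positions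
--     new_class = [0] * n
--     for i, r in enumerate(ranks):
--         new_class[text_order[i]] = r
--     return new_class
-- ===== Notes on version B (the rewrite author's own statement) =====
-- stated objective: alternative
-- what changed: A's single fused loop that reads the running rank back out of new_class[prev] is replaced by three separate passes: an indicator list of rank-increase flags, a prefix-sum pass turning flags into ranks, and a scatter pass writing ranks[i] to new_class[text_order[i]].
-- outside the precondition, e.g. on update_classes([0, 0], [5], 0): A returns [0, 0], B returns [0, 0]
import Mathlib
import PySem

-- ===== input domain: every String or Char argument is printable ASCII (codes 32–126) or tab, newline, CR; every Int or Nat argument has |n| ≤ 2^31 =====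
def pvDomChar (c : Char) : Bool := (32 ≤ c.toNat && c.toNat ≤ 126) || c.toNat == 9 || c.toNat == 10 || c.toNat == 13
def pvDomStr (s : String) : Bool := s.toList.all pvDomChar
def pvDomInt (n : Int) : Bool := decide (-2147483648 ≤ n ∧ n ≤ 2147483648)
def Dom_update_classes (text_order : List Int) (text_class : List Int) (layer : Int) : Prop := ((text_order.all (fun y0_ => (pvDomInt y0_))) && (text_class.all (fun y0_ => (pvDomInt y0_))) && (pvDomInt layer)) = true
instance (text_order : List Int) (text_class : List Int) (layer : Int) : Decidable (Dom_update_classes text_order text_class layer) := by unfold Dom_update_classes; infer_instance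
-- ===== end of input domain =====

-- B replaces A's fused running-rank loop by three passes (indicator flags, prefix sums, scatter);
-- same cost, alternative decomposition.  List reads/writes are ported with PySem.List.pyGetD / pySetD.

-- ===== PORT A =====
def update_classes (text_order : List Int) (text_class : List Int) (layer : Int) : List Int :=
  let n : Int := (text_order.length : Int)
  let new_class : List Int := List.replicate text_order.length (0 : Int)
  let new_class := PySem.List.pySetD new_class (PySem.List.pyGetD text_order 0 0) 0
  (PySem.List.pyRange 1 n 1).foldl (fun nc i =>
    let cur := PySem.List.pyGetD text_order i 0
    let prev := PySem.List.pyGetD text_order (i - 1) 0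
    let mid := PySem.Int.mod (cur + layer) n
    let mid_prev := PySem.Int.mod (prev + layer) n
    if PySem.List.pyGetD text_class cur 0 != PySem.List.pyGetD text_class prev 0
        || PySem.List.pyGetD text_class mid 0 != PySem.List.pyGetD text_class mid_prev 0 then
      PySem.List.pySetD nc cur (PySem.List.pyGetD nc prev 0 + 1)
    else
      PySem.List.pySetD nc cur (PySem.List.pyGetD nc prev 0)) new_class

-- ===== PORT B =====
def update_classes_alt (text_order : List Int) (text_class : List Int) (layer : Int) : List Int :=
  let n : Int := (text_order.length : Int)
  let flags : List Int := (PySem.List.pyRange 1 n 1).map (fun i =>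
    if PySem.List.pyGetD text_class (PySem.List.pyGetD text_order i 0) 0
        != PySem.List.pyGetD text_class (PySem.List.pyGetD text_order (i - 1) 0) 0
       || PySem.List.pyGetD text_class (PySem.Int.mod (PySem.List.pyGetD text_order i 0 + layer) n) 0
        != PySem.List.pyGetD text_class (PySem.Int.mod (PySem.List.pyGetD text_order (i - 1) 0 + layer) n) 0
    then (1 : Int) else 0)
  let rs : List Int × Int := flags.foldl (fun p f => (p.1 ++ [p.2 + f], p.2 + f)) ([0], 0)
  let ranks : List Int := rs.1
  let new_class : List Int := List.replicate text_order.length (0 : Int)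
  (PySem.List.enumerate ranks).foldl (fun nc ir =>
    PySem.List.pySetD nc (PySem.List.pyGetD text_order ir.1 0) ir.2) new_class

-- ===== PRECONDITION & SPEC =====
-- Pre_ restricts to the routine's natural domain: text_order nonempty, its entries valid
-- (possibly negative, Python-wrapped) positions for a length-n list, and text_class of
-- length ≥ n; outside it A raises IndexError (except for rare accidental corners where a
-- too-short text_class happens never to be indexed past its end).
def Pre_update_classes (text_order : List Int) (text_class : List Int) (layer : Int) : Prop :=
  text_order ≠ [] ∧ text_order.length ≤ text_class.length ∧
    ∀ x ∈ text_order, PySem.Raise.InRange text_order.length x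
instance (text_order : List Int) (text_class : List Int) (layer : Int) : Decidable (Pre_update_classes text_order text_class layer) := by unfold Pre_update_classes; infer_instance

def pvWitness_update_classes : List Int × List Int × Int := ([2, 0, 1], [1, 0, 1], 1)

def Spec_update_classes (text_order : List Int) (text_class : List Int) (layer : Int) (out : List Int) : Prop := out = update_classes_alt text_order text_class layer
instance (text_order : List Int) (text_class : List Int) (layer : Int) (out : List Int) : Decidable (Spec_update_classes text_order text_class layer out) := by unfold Spec_update_classes; infer_instance

-- ===== CLAIM (what is proved, stated in full; the proofs are below) =====
def Claim_equal_update_classes : Prop := ∀ (text_order : List Int) (text_class : List Int) (layer : Int), Dom_update_classes text_order text_class layer → Pre_update_classes text_order text_class layer → Spec_update_classes text_order text_class layer (update_classes text_order text_class layer)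

-- ===== LEMMAS AND PROOFS =====

-- the indicator at order position j (1 ≤ j), as an Int-valued flag
def pvFlag (text_order : List Int) (text_class : List Int) (layer : Int) (j : Nat) : Int :=
  if PySem.List.pyGetD text_class (PySem.List.pyGetD text_order (j : Int) 0) 0
      != PySem.List.pyGetD text_class (PySem.List.pyGetD text_order ((j : Int) - 1) 0) 0
     || PySem.List.pyGetD text_class (PySem.Int.mod (PySem.List.pyGetD text_order (j : Int) 0 + layer) (text_order.length : Int)) 0
      != PySem.List.pyGetD text_class (PySem.Int.mod (PySem.List.pyGetD text_order ((j : Int) - 1) 0 + layer) (text_order.length : Int)) 0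
  then 1 else 0

-- prefix sums of the flags: the rank at order position k
def pvRank (text_order : List Int) (text_class : List Int) (layer : Int) : Nat → Int
  | 0 => 0
  | (k+1) => pvRank text_order text_class layer k + pvFlag text_order text_class layer (k+1)

-- A's loop body as a named step function (identical to the lambda in update_classes)
def pvStepA (text_order : List Int) (text_class : List Int) (layer : Int) (nc : List Int) (i : Int) : List Int :=
  let n : Int := (text_order.length : Int)
  let cur := PySem.List.pyGetD text_order i 0
  let prev := PySem.List.pyGetD text_order (i - 1) 0
  let mid := PySem.Int.mod (cur + layer) n
  let mid_prev := PySem.Int.mod (prev + layer) n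
  if PySem.List.pyGetD text_class cur 0 != PySem.List.pyGetD text_class prev 0
      || PySem.List.pyGetD text_class mid 0 != PySem.List.pyGetD text_class mid_prev 0 then
    PySem.List.pySetD nc cur (PySem.List.pyGetD nc prev 0 + 1)
  else
    PySem.List.pySetD nc cur (PySem.List.pyGetD nc prev 0)

def pvNC0 (text_order : List Int) : List Int :=
  PySem.List.pySetD (List.replicate text_order.length (0 : Int)) (PySem.List.pyGetD text_order 0 0) 0

-- A's state after iterations i = 1 .. k
def pvAfold (o c : List Int) (l : Int) (k : Nat) : List Int :=
  (PySem.List.pyRange 1 ((k : Int) + 1) 1).foldl (pvStepA o c l) (pvNC0 o)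

-- B's scatter state after writing ranks 0 .. k
def pvBsc (o c : List Int) (l : Int) (k : Nat) : List Int :=
  (List.range (k + 1)).foldl
    (fun (nc : List Int) (j : Nat) => PySem.List.pySetD nc (PySem.List.pyGetD o ((j : Nat) : Int) 0) (pvRank o c l j))
    (List.replicate o.length (0 : Int))

-- the prefix-sum pass produces exactly the list of pvRank values
theorem pv_ranks_eq (o c : List Int) (l : Int) (m : Nat) :
    ((List.range m).map (fun k => pvFlag o c l (k + 1))).foldl
        (fun p f => (p.1 ++ [p.2 + f], p.2 + f)) (([0], 0) : List Int × Int)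
      = ((List.range (m + 1)).map (pvRank o c l), pvRank o c l m) := by
  induction m with
  | zero => simp [pvRank]
  | succ m ih =>
      rw [List.range_succ, List.map_append, List.foldl_append, ih]
      simp [List.range_succ (n := m + 1), pvRank]

-- enumerate of a mapped index range
theorem pv_enum_map_range' (g : Nat → Int) (m : Nat) : ∀ s : Nat,
    PySem.List.enumerate ((List.range' s m).map g) (s : Int)
      = (List.range' s m).map (fun (k : Nat) => (((k : Nat) : Int), g k)) := by
  induction m with
  | zero => intro s; simp
  | succ m ih =>
      intro s
      rw [List.range'_succ]
      simp only [List.map_cons, PySem.List.enumerate_cons]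
      have h := ih (s + 1)
      push_cast at h ⊢
      rw [h]

-- the Nat position a Python index i addresses in a list of length n (i in range)
def pvIdx (n : Nat) (i : Int) : Nat := if 0 ≤ i then i.toNat else n - (-i).toNat

theorem pv_pyIdx_eq (n : Nat) (i : Int) (h : PySem.Raise.InRange n i) :
    PySem.List.pyIdx? n i = some (pvIdx n i) := by
  obtain ⟨h1, h2⟩ := h
  unfold PySem.List.pyIdx? pvIdx
  split <;> (try split) <;> first | rfl | omega

theorem pv_pvIdx_lt (n : Nat) (i : Int) (h : PySem.Raise.InRange n i) (hn : 0 < n) :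
    pvIdx n i < n := by
  obtain ⟨h1, h2⟩ := h
  unfold pvIdx
  split <;> omega

theorem pv_pySetD {α : Type} (xs : List α) (i : Int) (v : α)
    (h : PySem.Raise.InRange xs.length i) :
    PySem.List.pySetD xs i v = xs.set (pvIdx xs.length i) v := by
  unfold PySem.List.pySetD PySem.List.pySet?
  rw [pv_pyIdx_eq _ _ h]
  rfl

theorem pv_pyGetD {α : Type} (xs : List α) (i : Int) (d : α)
    (h : PySem.Raise.InRange xs.length i) :
    PySem.List.pyGetD xs i d = xs.getD (pvIdx xs.length i) d := by
  unfold PySem.List.pyGetD PySem.List.pyGet?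
  rw [pv_pyIdx_eq _ _ h]
  simp [List.getD]

-- the loop invariant: A's fused state equals B's scatter state, has length n,
-- and carries pvRank k at position text_order[k]
theorem pv_inv (o c : List Int) (l : Int)
    (hmem : ∀ x ∈ o, PySem.Raise.InRange o.length x) :
    ∀ k : Nat, k < o.length →
      pvAfold o c l k = pvBsc o c l k ∧ (pvAfold o c l k).length = o.length ∧
      PySem.List.pyGetD (pvAfold o c l k) (o.getD k 0) 0 = pvRank o c l k := by
  intro k
  induction k with
  | zero =>
      intro h0
      have hA0 : pvAfold o c l 0 = pvNC0 o := by
        unfold pvAfold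
        rw [show (((0 : Nat) : Int) + 1) = 1 by norm_num,
            PySem.List.pyRange_one_eq_nil le_rfl]
        rfl
      have ht0e : o.getD 0 0 = o[0]'h0 := List.getD_eq_getElem o 0 h0
      have ht0 : o.getD 0 0 ∈ o := by rw [ht0e]; exact List.getElem_mem h0
      have ht := hmem _ ht0
      have hB0 : pvBsc o c l 0 = pvNC0 o := by
        unfold pvBsc pvNC0
        simp [pvRank, PySem.List.pyGetD_zero]
      refine ⟨hA0.trans hB0.symm, ?_, ?_⟩
      · rw [hA0]; unfold pvNC0; simp [PySem.List.length_pySetD]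
      · rw [hA0]; unfold pvNC0
        have hidx : pvIdx o.length (o.getD 0 0) < o.length := pv_pvIdx_lt _ _ ht h0
        rw [PySem.List.pyGetD_zero,
            pv_pySetD _ _ _ (by simpa using ht),
            pv_pyGetD _ _ _ (by simpa using ht)]
        simp only [List.length_set, List.length_replicate]
        rw [List.getD_eq_getElem _ 0 (by simpa using hidx)]
        simp [List.getElem_set, List.getElem_replicate, pvRank]
  | succ k ih =>
      intro hk1
      have hk : k < o.length := Nat.lt_of_succ_lt hk1
      obtain ⟨hAB, hL, hR⟩ := ih hk
      have hte : o.getD (k + 1) 0 = o[k + 1]'hk1 := List.getD_eq_getElem o 0 hk1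
      have htm : o.getD (k + 1) 0 ∈ o := by rw [hte]; exact List.getElem_mem hk1
      have ht := hmem _ htm
      have hstep : pvAfold o c l (k + 1) = pvStepA o c l (pvAfold o c l k) ((k : Int) + 1) := by
        unfold pvAfold
        rw [show (((k + 1 : Nat) : Int) + 1) = ((k : Int) + 1) + 1 by push_cast; ring,
            PySem.List.pyRange_one_succ_right (by omega : (1 : Int) ≤ (k : Int) + 1),
            List.foldl_append]
        rfl
      have hstep2 : pvStepA o c l (pvAfold o c l k) ((k : Int) + 1)
          = PySem.List.pySetD (pvAfold o c l k) (o.getD (k + 1) 0)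
              (pvRank o c l k + pvFlag o c l (k + 1)) := by
        have e1 : ((k : Int) + 1) = ((k + 1 : Nat) : Int) := by push_cast; ring
        have e2 : (((k + 1 : Nat) : Int) - 1) = ((k : Nat) : Int) := by push_cast; ring
        simp only [pvStepA, pvFlag, e1, e2, PySem.List.pyGetD_natCast]
        rw [hR]
        split <;> simp
      have hBstep : pvBsc o c l (k + 1)
          = PySem.List.pySetD (pvBsc o c l k) (o.getD (k + 1) 0) (pvRank o c l (k + 1)) := by
        unfold pvBsc
        rw [List.range_succ, List.foldl_append]
        simp [PySem.List.pyGetD_natCast]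
      have hrank : pvRank o c l (k + 1) = pvRank o c l k + pvFlag o c l (k + 1) := rfl
      have hA1 : pvAfold o c l (k + 1)
          = PySem.List.pySetD (pvBsc o c l k) (o.getD (k + 1) 0) (pvRank o c l (k + 1)) := by
        rw [hstep, hstep2, hAB, hrank]
      have hLB : (pvBsc o c l k).length = o.length := hAB ▸ hL
      refine ⟨hA1.trans hBstep.symm, ?_, ?_⟩
      · rw [hA1, PySem.List.length_pySetD, hLB]
      · have hidx : pvIdx o.length (o.getD (k + 1) 0) < o.length :=
          pv_pvIdx_lt _ _ ht (by omega)
        rw [hA1, pv_pySetD _ _ _ (by rw [hLB]; exact ht),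
            pv_pyGetD _ _ _ (by rw [List.length_set, hLB]; exact ht)]
        simp only [List.length_set, hLB]
        rw [List.getD_eq_getElem _ 0 (by simp only [List.length_set, hLB]; simpa using hidx)]
        simp [List.getElem_set]

-- the indicator pass produces exactly the list of pvFlag values
theorem pv_flags_eq (o c : List Int) (l : Int) :
    (PySem.List.pyRange 1 (o.length : Int) 1).map (fun i =>
      if PySem.List.pyGetD c (PySem.List.pyGetD o i 0) 0
          != PySem.List.pyGetD c (PySem.List.pyGetD o (i - 1) 0) 0
         || PySem.List.pyGetD c (PySem.Int.mod (PySem.List.pyGetD o i 0 + l) (o.length : Int)) 0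
          != PySem.List.pyGetD c (PySem.Int.mod (PySem.List.pyGetD o (i - 1) 0 + l) (o.length : Int)) 0
      then (1 : Int) else 0)
    = (List.range (o.length - 1)).map (fun k => pvFlag o c l (k + 1)) := by
  rw [PySem.List.pyRange_one,
      show ((o.length : Int) - 1).toNat = o.length - 1 by omega, List.map_map]
  refine List.map_congr_left (fun k _ => ?_)
  have e : (1 : Int) + (k : Int) = ((k + 1 : Nat) : Int) := by push_cast; ring
  simp only [Function.comp, e, pvFlag]

theorem update_classes_spec : Claim_equal_update_classes := by
  intro o c l _ hpre
  obtain ⟨hne, -, hmem⟩ := hpre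
  unfold Spec_update_classes
  have h0 : 0 < o.length := List.length_pos_of_ne_nil hne
  have hm1 : o.length - 1 + 1 = o.length := by omega
  obtain ⟨hAB, -, -⟩ := pv_inv o c l hmem (o.length - 1) (by omega)
  have hA : update_classes o c l = pvAfold o c l (o.length - 1) := by
    unfold update_classes pvAfold pvStepA pvNC0
    rw [show (((o.length - 1 : Nat) : Int) + 1) = (o.length : Int) by omega]
  have hB : update_classes_alt o c l = pvBsc o c l (o.length - 1) := by
    simp only [update_classes_alt]
    rw [pv_flags_eq, pv_ranks_eq, hm1]
    have he := pv_enum_map_range' (pvRank o c l) o.length 0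
    rw [← List.range_eq_range'] at he
    norm_num at he
    unfold pvBsc
    rw [hm1, he, List.foldl_map]
  rw [hA, hB, hAB]
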